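-- pv_equiv track=rewrite | github.com/EmanuelML64/ayed-2025-tps | TP8/# TP 8 Ejercicio 3.py | descomponer_correo
-- ===== SOURCE A (Python) =====
-- from typing import Tuple
--
-- def descomponer_correo(correo: str) -> Tuple[str, ...]:
--     """
--     Descompone una dirección de correo electrónico en sus partes.
--
--     Parámetros
--
--     correo : str
--         Cadena que contiene una dirección de correo electrónico.
--
--     Retorna
--
--     Tuple[str, ...]
--         Una tupla con las partes que componen el correo.
--         Ejemplo:
--             "alguien@uade.edu.ar" -> ("alguien", "uade", "edu", "ar")
--
--         Si el formato es inválido, retorna una tupla vacía.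
--     """
--
--     if correo.count('@') != 1:
--         return ()
--
--     usuario, dominio = correo.split('@')
--
--
--     if not usuario or ' ' in usuario:
--         return ()
--
--
--     partes_dominio = dominio.split('.')
--
--     if len(partes_dominio) < 2:
--         return ()
--
--
--     for parte in partes_dominio:
--         if not parte or ' ' in parte:
--             return ()
--
--     return (usuario, *partes_dominio)
-- ===== SOURCE B (Python) =====
-- def descomponer_correo(correo):
--     """Single left-to-right scan: split and validate in one pass instead of
--     count/split/loop; collects parts as char lists, joins once at the end."""
--     parts = []
--     cur = []
--     visto_arroba = False
--     for ch in correo: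
--         if ch == '@':
--             if visto_arroba or not cur:
--                 return ()
--             parts.append(cur)
--             cur = []
--             visto_arroba = True
--         elif ch == '.' and visto_arroba:
--             if not cur:
--                 return ()
--             parts.append(cur)
--             cur = []
--         elif ch == ' ':
--             return ()
--         else:
--             cur.append(ch)
--     if not visto_arroba or not cur or len(parts) < 2:
--         return ()
--     parts.append(cur)
--     return tuple(''.join(p) for p in parts)
-- ===== Notes on version B (the rewrite author's own statement) =====
-- stated objective: alternative
-- what changed: Replaces the original's multi-pass structure (separator count, two splits and a validation loop) with a single left-to-right character scan that splits at the separators and validates the user and domain parts on the fly.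
import Mathlib
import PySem

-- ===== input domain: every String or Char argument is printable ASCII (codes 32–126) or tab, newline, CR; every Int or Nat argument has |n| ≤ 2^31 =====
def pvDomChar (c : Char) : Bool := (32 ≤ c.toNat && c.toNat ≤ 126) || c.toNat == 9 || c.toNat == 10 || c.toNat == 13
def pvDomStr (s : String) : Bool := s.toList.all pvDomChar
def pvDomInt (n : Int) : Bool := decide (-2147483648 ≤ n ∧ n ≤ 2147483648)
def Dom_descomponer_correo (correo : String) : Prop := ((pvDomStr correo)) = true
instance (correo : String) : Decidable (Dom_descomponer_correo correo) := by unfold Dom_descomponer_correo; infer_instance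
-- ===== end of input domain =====

-- B replaces A's multi-pass structure (separator count, two splits, validation loop) with one
-- single left-to-right character scan that splits and validates in one pass (alternative decomposition, same O(n) cost).

-- ===== PORT A =====
def descomponer_correo (correo : String) : List String :=
  -- if correo.count('@') != 1: return ()
  if PySem.Str.count correo "@" ≠ 1 then []
  else
    -- usuario, dominio = correo.split('@')   (count = 1 guarantees exactly two pieces;
    -- the catch-all arm below is unreachable and only makes the match total)
    match PySem.Chars.splitOn correo.toList ['@'] with
    | [usuario, dominio] =>
      -- if not usuario or ' ' in usuario: return ()
      if usuario = [] ∨ PySem.Chars.isIn [' '] usuario then []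
      else
        -- partes_dominio = dominio.split('.')
        let partes := PySem.Chars.splitOn dominio ['.']
        -- if len(partes_dominio) < 2: return ()
        if partes.length < 2 then []
        -- for parte in partes_dominio: if not parte or ' ' in parte: return ()
        else if partes.any (fun p => decide (p = []) || PySem.Chars.isIn [' '] p) then []
        else String.ofList usuario :: partes.map String.ofList
    | _ => []

-- ===== PORT B =====
-- the scan loop of Source B: state = (parts so far, current part, seen '@'); none = early `return ()`
def pvScan : List Char → List (List Char) → List Char → Bool → Option (List (List Char))
  | [], parts, cur, vistoArroba =>
      if vistoArroba = false ∨ cur = [] ∨ parts.length < 2 then none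
      else some (parts ++ [cur])
  | ch :: rest, parts, cur, vistoArroba =>
      if ch = '@' then
        if vistoArroba = true ∨ cur = [] then none
        else pvScan rest (parts ++ [cur]) [] true
      else if ch = '.' ∧ vistoArroba = true then
        if cur = [] then none
        else pvScan rest (parts ++ [cur]) [] vistoArroba
      else if ch = ' ' then none
      else pvScan rest parts (cur ++ [ch]) vistoArroba

def descomponer_correo_alt (correo : String) : List String :=
  match pvScan correo.toList [] [] false with
  | none => []
  | some parts => parts.map String.ofList   -- tuple(''.join(p) for p in parts)

-- ===== PRECONDITION & SPEC =====
def Spec_descomponer_correo (correo : String) (out : List String) : Prop := out = descomponer_correo_alt correo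
instance (correo : String) (out : List String) : Decidable (Spec_descomponer_correo correo out) := by unfold Spec_descomponer_correo; infer_instance

-- ===== CLAIM (what is proved, stated in full; the proofs are below) =====
def Claim_equal_descomponer_correo : Prop := ∀ (correo : String), Dom_descomponer_correo correo → Spec_descomponer_correo correo (descomponer_correo correo)

-- ===== LEMMAS AND PROOFS =====

-- reference single-character splitter (proof-only; both ports are related to it)
def pvSplitC (c : Char) : List Char → List (List Char)
  | [] => [[]]
  | a :: t => if a = c then [] :: pvSplitC c t else (pvSplitC c t).modifyHead (a :: ·)

theorem pvSplitC_ne_nil (c : Char) (l : List Char) : pvSplitC c l ≠ [] := by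
  induction l with
  | nil => simp [pvSplitC]
  | cons a t ih =>
    simp only [pvSplitC]
    split
    · simp
    · cases h : pvSplitC c t with
      | nil => exact absurd h ih
      | cons x xs => simp [List.modifyHead]

theorem pv_count_go (c : Char) (fuel : Nat) (l : List Char) (acc : Nat)
    (h : l.length ≤ fuel) : PySem.Chars.count.go [c] fuel l acc = acc + l.count c := by
  induction fuel generalizing l acc with
  | zero =>
    have : l = [] := by cases l <;> simp_all
    subst this; simp [PySem.Chars.count.go]
  | succ n ih =>
    cases l with
    | nil => simp [PySem.Chars.count.go]
    | cons a t =>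
      simp only [PySem.Chars.count.go]
      by_cases hac : a = c
      · subst hac
        have hp : [a].isPrefixOf (a :: t) = true := by simp [List.isPrefixOf]
        rw [if_pos hp]
        simp only [List.length_cons] at h
        simp only [List.length_singleton, List.drop_one, List.tail_cons]
        rw [ih t (acc + 1) (by omega)]
        simp
        omega
      · have hp : [c].isPrefixOf (a :: t) = false := by simp [List.isPrefixOf]; exact fun h => absurd h.symm hac
        rw [if_neg (by simp [hp])]
        simp only [List.length_cons] at h
        rw [ih t acc (by omega)]
        simp [hac]

theorem pv_count_singleton (c : Char) (l : List Char) :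
    PySem.Chars.count l [c] = l.count c := by
  simp [PySem.Chars.count, pv_count_go c l.length l 0 le_rfl]

theorem pv_splitOn_go (c : Char) (fuel : Nat) (l : List Char) (cur : List Char)
    (acc : List (List Char)) (h : l.length ≤ fuel) :
    PySem.Chars.splitOn.go [c] fuel l cur acc
      = acc.reverse ++ (pvSplitC c l).modifyHead (cur.reverse ++ ·) := by
  induction fuel generalizing l cur acc with
  | zero =>
    have : l = [] := by cases l <;> simp_all
    subst this; simp [PySem.Chars.splitOn.go, pvSplitC, List.modifyHead]
  | succ n ih =>
    cases l with
    | nil => simp [PySem.Chars.splitOn.go, pvSplitC, List.modifyHead]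
    | cons a t =>
      simp only [PySem.Chars.splitOn.go]
      simp only [List.length_cons] at h
      by_cases hac : a = c
      · subst hac
        have hp : [a].isPrefixOf (a :: t) = true := by simp [List.isPrefixOf]
        rw [if_pos hp]
        simp only [List.length_singleton, List.drop_one, List.tail_cons]
        rw [ih t [] (cur.reverse :: acc) (by omega)]
        simp [pvSplitC, List.modifyHead]
        cases hs : pvSplitC a t with
        | nil => exact absurd hs (pvSplitC_ne_nil a t)
        | cons x xs => simp [List.modifyHead]
      · have hp : [c].isPrefixOf (a :: t) = false := by simp [List.isPrefixOf]; exact fun h => absurd h.symm hac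
        rw [if_neg (by simp [hp])]
        rw [ih t (a :: cur) acc (by omega)]
        simp only [pvSplitC, if_neg hac]
        cases hs : pvSplitC c t with
        | nil => exact absurd hs (pvSplitC_ne_nil c t)
        | cons x xs => simp [List.modifyHead]

theorem pv_splitOn_singleton (c : Char) (l : List Char) :
    PySem.Chars.splitOn l [c] = pvSplitC c l := by
  rw [PySem.Chars.splitOn, pv_splitOn_go c (l.length + 1) l [] [] (by omega)]
  cases hs : pvSplitC c l with
  | nil => exact absurd hs (pvSplitC_ne_nil c l)
  | cons x xs => simp [List.modifyHead]

theorem pvSplitC_not_mem {c : Char} {l : List Char} (h : c ∉ l) :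
    pvSplitC c l = [l] := by
  induction l with
  | nil => simp [pvSplitC]
  | cons a t ih =>
    simp only [List.mem_cons, not_or] at h
    simp [pvSplitC, Ne.symm h.1, ih h.2, List.modifyHead]

theorem pvSplitC_append {c : Char} {u : List Char} (d : List Char) (h : c ∉ u) :
    pvSplitC c (u ++ c :: d) = u :: pvSplitC c d := by
  induction u with
  | nil => simp [pvSplitC]
  | cons a t ih =>
    simp only [List.mem_cons, not_or] at h
    simp only [List.cons_append, pvSplitC, if_neg (Ne.symm h.1) , ih h.2, List.modifyHead]

theorem pv_mem_splitC {a c : Char} (hne : a ≠ c) (l : List Char) :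
    a ∈ l ↔ ∃ p ∈ pvSplitC c l, a ∈ p := by
  induction l with
  | nil => simp [pvSplitC]
  | cons b t ih =>
    by_cases hbc : b = c
    · subst hbc
      simp [pvSplitC, List.mem_cons, hne, ih]
    · cases hs : pvSplitC c t with
      | nil => exact absurd hs (pvSplitC_ne_nil c t)
      | cons x xs =>
        simp only [pvSplitC, if_neg hbc, hs, List.modifyHead]
        rw [hs] at ih
        constructor
        · intro hmem
          rcases List.mem_cons.mp hmem with heq | hat
          · exact ⟨b :: x, List.mem_cons_self, by simp [heq]⟩
          · rcases ih.mp hat with ⟨p, hp, hap⟩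
            rcases List.mem_cons.mp hp with heq | hp'
            · exact ⟨b :: x, List.mem_cons_self, List.mem_cons_of_mem b (heq ▸ hap)⟩
            · exact ⟨p, List.mem_cons_of_mem _ hp', hap⟩
        · rintro ⟨p, hp, hap⟩
          rcases List.mem_cons.mp hp with heq | hp'
          · rcases List.mem_cons.mp (heq ▸ hap) with heq2 | hax
            · exact List.mem_cons.mpr (Or.inl heq2)
            · exact List.mem_cons_of_mem b (ih.mpr ⟨x, List.mem_cons_self, hax⟩)
          · exact List.mem_cons_of_mem b (ih.mpr ⟨p, List.mem_cons_of_mem _ hp', hap⟩)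

theorem pv_isIn_singleton (a : Char) (l : List Char) :
    PySem.Chars.isIn [a] l = true ↔ a ∈ l := by
  rw [PySem.Chars.isIn_iff_infix]
  constructor
  · intro h; exact h.mem (by simp)
  · intro h
    rcases List.append_of_mem h with ⟨s, t, rfl⟩
    exact ⟨s, t, by simp⟩

theorem pv_mem_split_first {a : Char} {l : List Char} (h : a ∈ l) :
    ∃ s t, l = s ++ a :: t ∧ a ∉ s := by
  induction l with
  | nil => simp at h
  | cons b t ih =>
    by_cases hb : b = a
    · exact ⟨[], t, by simp [hb]⟩
    · have hat : a ∈ t := by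
        rcases List.mem_cons.mp h with heq | hat
        · exact absurd heq.symm hb
        · exact hat
      rcases ih hat with ⟨s, r, hsr, hns⟩
      exact ⟨b :: s, r, by simp [hsr], by simp [Ne.symm hb, hns]⟩

-- the scan never succeeds if no '@' is left (phase: before the '@')
theorem pvScan_no_at (u : List Char) (parts : List (List Char)) (cur : List Char)
    (h : '@' ∉ u) : pvScan u parts cur false = none := by
  induction u generalizing parts cur with
  | nil => simp [pvScan]
  | cons ch rest ih =>
    simp only [List.mem_cons, not_or] at h
    simp only [pvScan, if_neg (Ne.symm h.1)]
    rw [if_neg (by simp)]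
    split
    · rfl
    · exact ih _ _ h.2

-- consuming the user part up to the first '@'
theorem pvScan_user (u1 : List Char) (u2 : List Char) (parts : List (List Char))
    (cur : List Char) (h : '@' ∉ u1) :
    pvScan (u1 ++ '@' :: u2) parts cur false
      = if ' ' ∈ u1 ∨ cur ++ u1 = [] then none
        else pvScan u2 (parts ++ [cur ++ u1]) [] true := by
  induction u1 generalizing parts cur with
  | nil =>
    simp only [List.nil_append, pvScan]
    by_cases hcur : cur = [] <;> simp [hcur]
  | cons ch rest ih =>
    simp only [List.mem_cons, not_or] at h
    simp only [List.cons_append, pvScan, if_neg (Ne.symm h.1)]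
    rw [if_neg (by simp)]
    by_cases hsp : ch = ' '
    · rw [if_pos hsp, if_pos (Or.inl (by simp [hsp]))]
    · rw [if_neg hsp, ih _ _ h.2]
      have h1 : (' ' ∈ ch :: rest ∨ cur ++ ch :: rest = []) ↔ (' ' ∈ rest ∨ cur ++ [ch] ++ rest = []) := by
        simp [Ne.symm hsp]
      rw [if_congr h1 rfl rfl]
      simp

-- consuming the domain (phase: after the '@')
theorem pvScan_domain (d : List Char) (parts : List (List Char)) (cur : List Char)
    (hc : '.' ∉ cur) :
    pvScan d parts cur true
      = if '@' ∈ d ∨ ' ' ∈ d ∨ (∃ p ∈ pvSplitC '.' (cur ++ d), p = [])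
           ∨ parts.length + (pvSplitC '.' (cur ++ d)).length < 3 then none
        else some (parts ++ pvSplitC '.' (cur ++ d)) := by
  induction d generalizing parts cur with
  | nil =>
    rw [List.append_nil, pvSplitC_not_mem hc]
    simp only [pvScan]
    by_cases hcur : cur = []
    · simp [hcur]
    · by_cases hlen : parts.length < 2
      · have h3 : parts.length + 1 < 3 := by omega
        simp [hcur, hlen, h3]
      · have h3 : ¬ (parts.length + 1 < 3) := by omega
        simp [hcur, hlen, h3]
  | cons ch rest ih =>
    simp only [pvScan]
    by_cases h1 : ch = '@'
    · subst h1
      rw [if_pos rfl, if_pos (Or.inl List.mem_cons_self)]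
      simp
    · rw [if_neg h1]
      by_cases h2 : ch = '.'
      · subst h2
        rw [if_pos ⟨rfl, trivial⟩]
        have hsp : pvSplitC '.' (cur ++ '.' :: rest) = cur :: pvSplitC '.' rest :=
          pvSplitC_append rest hc
        by_cases hcur : cur = []
        · rw [if_pos hcur]
          rw [if_pos (Or.inr (Or.inr (Or.inl ⟨cur, by rw [hsp]; exact List.mem_cons_self, hcur⟩)))]
        · rw [if_neg hcur, ih (parts ++ [cur]) [] (by simp)]
          rw [List.nil_append, hsp]
          have hne1 : ('@' : Char) ≠ '.' := by decide
          have hne2 : (' ' : Char) ≠ '.' := by decide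
          have hcond : ('@' ∈ rest ∨ ' ' ∈ rest ∨ (∃ p ∈ pvSplitC '.' rest, p = [])
                ∨ (parts ++ [cur]).length + (pvSplitC '.' rest).length < 3)
              ↔ ('@' ∈ '.' :: rest ∨ ' ' ∈ '.' :: rest ∨ (∃ p ∈ cur :: pvSplitC '.' rest, p = [])
                ∨ parts.length + (cur :: pvSplitC '.' rest).length < 3) := by
            simp only [List.mem_cons, List.length_append, List.length_cons, List.length_nil]
            constructor
            · rintro (h | h | ⟨p, hp, hpe⟩ | h)
              · exact Or.inl (Or.inr h)
              · exact Or.inr (Or.inl (Or.inr h))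
              · exact Or.inr (Or.inr (Or.inl ⟨p, Or.inr hp, hpe⟩))
              · exact Or.inr (Or.inr (Or.inr (by omega)))
            · rintro ((h | h) | (h | h) | ⟨p, hp | hp, hpe⟩ | h)
              · exact absurd h hne1
              · exact Or.inl h
              · exact absurd h hne2
              · exact Or.inr (Or.inl h)
              · exact absurd (hp ▸ hpe) hcur
              · exact Or.inr (Or.inr (Or.inl ⟨p, hp, hpe⟩))
              · exact Or.inr (Or.inr (Or.inr (by omega)))
          rw [if_congr hcond rfl (show some ((parts ++ [cur]) ++ pvSplitC '.' rest)
              = some (parts ++ cur :: pvSplitC '.' rest) by simp)]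
      · rw [if_neg (by simp [h2])]
        by_cases h3 : ch = ' '
        · subst h3
          rw [if_pos rfl, if_pos (Or.inr (Or.inl List.mem_cons_self))]
        · rw [if_neg h3, ih parts (cur ++ [ch])
            (by simp only [List.mem_append, List.mem_singleton, not_or]
                exact ⟨hc, fun h => h2 h.symm⟩)]
          rw [List.append_assoc, List.singleton_append]
          have hcond : ('@' ∈ rest ∨ ' ' ∈ rest ∨ (∃ p ∈ pvSplitC '.' (cur ++ ch :: rest), p = [])
                ∨ parts.length + (pvSplitC '.' (cur ++ ch :: rest)).length < 3)
              ↔ ('@' ∈ ch :: rest ∨ ' ' ∈ ch :: rest ∨ (∃ p ∈ pvSplitC '.' (cur ++ ch :: rest), p = [])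
                ∨ parts.length + (pvSplitC '.' (cur ++ ch :: rest)).length < 3) := by
            simp only [List.mem_cons]
            constructor
            · rintro (h | h | h | h)
              · exact Or.inl (Or.inr h)
              · exact Or.inr (Or.inl (Or.inr h))
              · exact Or.inr (Or.inr (Or.inl h))
              · exact Or.inr (Or.inr (Or.inr h))
            · rintro ((h | h) | (h | h) | h | h)
              · exact absurd h.symm h1
              · exact Or.inl h
              · exact absurd h.symm h3
              · exact Or.inr (Or.inl h)
              · exact Or.inr (Or.inr (Or.inl h))
              · exact Or.inr (Or.inr (Or.inr h))
          rw [if_congr hcond rfl rfl]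

theorem pv_main (L : List Char) :
    (if L.count '@' ≠ 1 then []
     else
       match pvSplitC '@' L with
       | [usuario, dominio] =>
         if usuario = [] ∨ PySem.Chars.isIn [' '] usuario then []
         else
           let partes := pvSplitC '.' dominio
           if partes.length < 2 then []
           else if partes.any (fun p => decide (p = []) || PySem.Chars.isIn [' '] p) then []
           else String.ofList usuario :: partes.map String.ofList
       | _ => [])
    = (match pvScan L [] [] false with
       | none => []
       | some parts => parts.map String.ofList) := by
  by_cases hA : L.count '@' = 1
  · rw [if_neg (not_not_intro hA)]
    have hmem : '@' ∈ L := List.count_pos_iff.mp (by omega)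
    obtain ⟨u, d, rfl, hu⟩ := pv_mem_split_first hmem
    have hu0 : u.count '@' = 0 := List.count_eq_zero_of_not_mem hu
    have hd : '@' ∉ d := by
      rw [← List.count_eq_zero]
      rw [List.count_append, List.count_cons] at hA
      simp at hA
      omega
    rw [pvSplitC_append d hu, pvSplitC_not_mem hd, pvScan_user u d [] [] hu]
    dsimp only
    by_cases hbad : u = [] ∨ ' ' ∈ u
    · have ha1 : u = [] ∨ PySem.Chars.isIn [' '] u = true := by
        rcases hbad with h | h
        · exact Or.inl h
        · exact Or.inr ((pv_isIn_singleton ' ' u).mpr h)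
      have hb1 : ' ' ∈ u ∨ ([] : List Char) ++ u = [] := by
        rcases hbad with h | h
        · exact Or.inr (by simp [h])
        · exact Or.inl h
      rw [if_pos ha1, if_pos hb1]
    · rw [not_or] at hbad
      have ha1 : ¬(u = [] ∨ PySem.Chars.isIn [' '] u = true) := by
        rintro (h | h)
        · exact hbad.1 h
        · exact hbad.2 ((pv_isIn_singleton ' ' u).mp h)
      have hb1 : ¬(' ' ∈ u ∨ ([] : List Char) ++ u = []) := by
        rintro (h | h)
        · exact hbad.2 h
        · exact hbad.1 (by simpa using h)
      rw [if_neg ha1, if_neg hb1]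
      rw [pvScan_domain d ([] ++ [[] ++ u]) [] (by simp)]
      simp only [List.nil_append]
      have hspace : ' ' ∈ d ↔ ∃ p ∈ pvSplitC '.' d, ' ' ∈ p := pv_mem_splitC (by decide) d
      have hany : (pvSplitC '.' d).any (fun p => decide (p = []) || PySem.Chars.isIn [' '] p) = true
          ↔ ∃ p ∈ pvSplitC '.' d, (p = [] ∨ ' ' ∈ p) := by
        simp only [List.any_eq_true, Bool.or_eq_true, decide_eq_true_eq, pv_isIn_singleton]
      by_cases hlen : (pvSplitC '.' d).length < 2
      · have hb2 : '@' ∈ d ∨ ' ' ∈ d ∨ (∃ p ∈ pvSplitC '.' d, p = [])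
            ∨ ([u] : List (List Char)).length + (pvSplitC '.' d).length < 3 := by
          refine Or.inr (Or.inr (Or.inr ?_))
          simp only [List.length_cons, List.length_nil]
          omega
        rw [if_pos hlen, if_pos hb2]
      · by_cases hbad2 : ∃ p ∈ pvSplitC '.' d, (p = [] ∨ ' ' ∈ p)
        · rw [if_neg hlen, if_pos (hany.mpr hbad2)]
          have hb2 : '@' ∈ d ∨ ' ' ∈ d ∨ (∃ p ∈ pvSplitC '.' d, p = [])
              ∨ ([u] : List (List Char)).length + (pvSplitC '.' d).length < 3 := by
            obtain ⟨p, hp, hpp⟩ := hbad2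
            rcases hpp with h | h
            · exact Or.inr (Or.inr (Or.inl ⟨p, hp, h⟩))
            · exact Or.inr (Or.inl (hspace.mpr ⟨p, hp, h⟩))
          rw [if_pos hb2]
        · have hb2 : ¬('@' ∈ d ∨ ' ' ∈ d ∨ (∃ p ∈ pvSplitC '.' d, p = [])
              ∨ ([u] : List (List Char)).length + (pvSplitC '.' d).length < 3) := by
            rintro (h | h | h | h)
            · exact hd h
            · exact hbad2 (by
                obtain ⟨p, hp, hpp⟩ := hspace.mp h
                exact ⟨p, hp, Or.inr hpp⟩)
            · exact hbad2 (by
                obtain ⟨p, hp, hpp⟩ := h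
                exact ⟨p, hp, Or.inl hpp⟩)
            · exact hlen (by
                simp only [List.length_cons, List.length_nil] at h
                omega)
          rw [if_neg hlen, if_neg (fun h => hbad2 (hany.mp h)), if_neg hb2]
          simp
  · rw [if_pos hA]
    by_cases hmem : '@' ∈ L
    · obtain ⟨u1, u2, rfl, hu1⟩ := pv_mem_split_first hmem
      rw [pvScan_user u1 u2 [] [] hu1]
      by_cases hbad : ' ' ∈ u1 ∨ ([] : List Char) ++ u1 = []
      · rw [if_pos hbad]
      · rw [if_neg hbad, pvScan_domain u2 ([] ++ [[] ++ u1]) [] (by simp)]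
        have h2 : '@' ∈ u2 := by
          rw [← List.count_pos_iff]
          have h0 : u1.count '@' = 0 := List.count_eq_zero_of_not_mem hu1
          rw [List.count_append, List.count_cons] at hA
          simp [h0] at hA
          omega
        rw [if_pos (Or.inl h2)]
    · rw [pvScan_no_at L [] [] hmem]

-- ===== VERDICT (by name: the statement is the Claim_ definition above) =====
theorem descomponer_correo_spec : Claim_equal_descomponer_correo := by
  intro correo _
  unfold Spec_descomponer_correo descomponer_correo descomponer_correo_alt
  have hcnt : PySem.Str.count correo "@" = correo.toList.count '@' := by
    rw [PySem.Str.count]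
    exact pv_count_singleton '@' correo.toList
  rw [hcnt]
  simp only [pv_splitOn_singleton]
  exact pv_main correo.toList
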